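-- pv_equiv track=rewrite | github.com/koii-network/prometheus-beta | src/word_position_mapper.py | map_word_positions
-- ===== SOURCE A (Python) =====
-- def map_word_positions(text):
--     """
--     Map words to their positions in the input text.
--
--     Args:
--         text (str): Input text to analyze
--
--     Returns:
--         dict: A dictionary with unique words as keys and lists of their positions as values
--     """
--     # Split the text into words and preserve their original case
--     words = text.split()
--
--     # Create a dictionary to store word positions
--     word_positions = {}
--
--     # Iterate through words and track their positions
--     for position, word in enumerate(words):
--         # Convert word to lowercase for case-insensitive unique key
--         normalized_word = word.lower()
--
--         # Add position to the word's list of positions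
--         if normalized_word not in word_positions:
--             word_positions[normalized_word] = []
--         word_positions[normalized_word].append(position)
--
--     return word_positions
-- ===== SOURCE B (Python) =====
-- def map_word_positions(text):
--     """Map lowercased words of text to the ascending list of their positions.
--
--     Different decomposition from the accumulator loop: normalize once, take the
--     distinct words in first-appearance order (dict.fromkeys), and build each
--     position list with one comprehension scan per distinct word.
--     """
--     words = [w.lower() for w in text.split()]
--     return {w: [i for i, x in enumerate(words) if x == w]
--             for w in dict.fromkeys(words)}
-- ===== Notes on version B (the rewrite author's own statement) =====
-- stated objective: simpler
-- what changed: Replaces the imperative dict-accumulating loop (setdefault-style insert then append per word) by a declarative dict comprehension: normalize all words once, dedup them with dict.fromkeys, and gather each word's positions with a per-key enumerate scan.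
import Mathlib
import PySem

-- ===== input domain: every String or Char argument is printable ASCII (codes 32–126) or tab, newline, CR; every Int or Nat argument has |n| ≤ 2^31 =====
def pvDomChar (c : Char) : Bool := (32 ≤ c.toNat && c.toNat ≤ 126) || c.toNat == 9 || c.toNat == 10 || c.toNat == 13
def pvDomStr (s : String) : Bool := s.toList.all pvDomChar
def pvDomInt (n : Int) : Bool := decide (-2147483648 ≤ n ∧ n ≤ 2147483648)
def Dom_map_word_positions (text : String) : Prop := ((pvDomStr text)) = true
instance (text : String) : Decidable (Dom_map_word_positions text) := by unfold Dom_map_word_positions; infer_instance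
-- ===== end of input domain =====

-- B replaces A's imperative dict-accumulating loop by dedup + one position-gathering scan per distinct word (objective: simpler).

-- ===== PORT A =====
def map_word_positions (text : String) : List (String × List Int) :=
  let words := PySem.Str.split₀ text
  ((PySem.List.enumerate words).foldl (fun d p =>
      let nw := PySem.Str.lower p.2
      let d := if d.contains nw then d else d.insert nw ([] : List Int)
      d.modify nw [] (fun l => l ++ [p.1])) PySem.Dict.empty).items

-- ===== PORT B =====
def map_word_positions_alt (text : String) : List (String × List Int) :=
  let ws := (PySem.Str.split₀ text).map PySem.Str.lower
  (PySem.List.dedup ws).map (fun w =>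
    (w, (PySem.List.enumerate ws).filterMap (fun p => if p.2 = w then some p.1 else none)))

-- ===== PRECONDITION & SPEC =====
def Spec_map_word_positions (text : String) (out : List (String × List Int)) : Prop := out = map_word_positions_alt text
instance (text : String) (out : List (String × List Int)) : Decidable (Spec_map_word_positions text out) := by unfold Spec_map_word_positions; infer_instance

-- ===== CLAIM (what is proved, stated in full; the proofs are below) =====
def Claim_equal_map_word_positions : Prop := ∀ (text : String), Dom_map_word_positions text → Spec_map_word_positions text (map_word_positions text)

-- ===== LEMMAS AND PROOFS =====

-- A's "if absent insert []" followed by the append is one modify step.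
theorem step_eq_modify (d : PySem.Dict String (List Int)) (w : String) (i : Int) :
    (if d.contains w then d else d.insert w ([] : List Int)).modify w [] (fun l => l ++ [i])
      = d.modify w [] (fun l => l ++ [i]) := by
  by_cases h : d.contains w
  · simp [h]
  · simp only [h, Bool.false_eq_true, if_false]
    simp [PySem.Dict.modify, PySem.Dict.getD_insert_self, PySem.Dict.insert_insert_self,
      PySem.Dict.getD_of_not_contains d ([] : List Int) (by simpa using h)]

theorem enumerate_map_lower (words : List String) (s : Int) :
    PySem.List.enumerate (words.map PySem.Str.lower) s
      = (PySem.List.enumerate words s).map (fun p => (p.1, PySem.Str.lower p.2)) := by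
  induction words generalizing s with
  | nil => simp [PySem.List.enumerate_nil]
  | cons x xs ih => simp [PySem.List.enumerate_cons, ih]

theorem filterMap_if_eq_map_filter {α β : Type} (l : List α) (q : α → Prop) [DecidablePred q] (g : α → β) :
    l.filterMap (fun x => if q x then some (g x) else none)
      = (l.filter (fun x => decide (q x))).map g := by
  induction l with
  | nil => rfl
  | cons x xs ih => by_cases h : q x <;> simp [h, ih]

theorem map_word_positions_spec : Claim_equal_map_word_positions := by
  intro text _
  unfold Spec_map_word_positions map_word_positions map_word_positions_alt
  simp only []
  set words := PySem.Str.split₀ text with hwords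
  set ws := words.map PySem.Str.lower with hws
  -- rewrite A's fold step into the pure modify form
  have hstep :
      (fun (d : PySem.Dict String (List Int)) (p : Int × String) =>
          let nw := PySem.Str.lower p.2
          let d' := if d.contains nw then d else d.insert nw ([] : List Int)
          d'.modify nw [] (fun l => l ++ [p.1]))
        = fun d p => d.modify (PySem.Str.lower p.2) [] (fun l => l ++ [p.1]) := by
    funext d p; exact step_eq_modify d (PySem.Str.lower p.2) p.1
  rw [hstep]
  set F := (PySem.List.enumerate words).foldl
      (fun d p => d.modify (PySem.Str.lower p.2) [] (fun l => l ++ [p.1])) PySem.Dict.empty with hF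
  -- keys of the fold
  have hkeys : F.keys = PySem.Set.ofList ws := by
    rw [hF, PySem.Dict.keys_foldl_modify_key]
    have : (PySem.List.enumerate words).map (fun p => PySem.Str.lower p.2)
        = words.map PySem.Str.lower := by
      rw [show (fun p : Int × String => PySem.Str.lower p.2)
            = PySem.Str.lower ∘ (fun p : Int × String => p.2) from rfl,
        ← List.map_map, PySem.List.map_snd_enumerate]
    rw [this]
    simp [PySem.Set.update_nil_left, hws]
  have hnd : F.keys.Nodup := by
    rw [hkeys]; exact PySem.Set.nodup_ofList ws
  -- value stored at each key
  have hval : ∀ c : String, F.getD c [] =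
      (PySem.List.enumerate ws).filterMap (fun p => if p.2 = c then some p.1 else none) := by
    intro c
    have hfold : F = ((PySem.List.enumerate words).map
        (fun p => (PySem.Str.lower p.2, p.1))).foldl
        (fun d q => d.modify q.1 [] (fun l => l ++ [q.2])) PySem.Dict.empty := by
      rw [hF, List.foldl_map]
    rw [hfold, PySem.Dict.getD_foldl_modify_append]
    rw [hws, enumerate_map_lower,
      filterMap_if_eq_map_filter ((PySem.List.enumerate words).map
        (fun p => (p.1, PySem.Str.lower p.2))) (fun p => p.2 = c) (fun p => p.1)]
    simp [List.filter_map, List.map_map, Function.comp_def, PySem.Dict.getD_empty,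
      Bool.beq_eq_decide_eq]
  -- assemble
  rw [PySem.Dict.items_eq_map_keys F hnd [], hkeys]
  have : PySem.List.dedup ws = PySem.Set.ofList ws := PySem.List.dedup_eq_ofList ws
  rw [this]
  exact List.map_congr_left (fun k _ => by rw [hval k])
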